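-- pv_equiv track=rewrite | github.com/DarylWenthur/python-repo | support_network_gui_ai/support_network.py | connect_with_mentor
-- ===== SOURCE A (Python) =====
-- def connect_with_mentor(profile):
--     """Provides a mentor based on the user's neurodivergent condition"""
--     mentors = {
--         "John Doe": "Autism",
--         "Jane Smith": "ADHD",
--         "Alex Johnson": "Dyslexia",
--         "Emily Davis": "Dyspraxia",
--         "Michael Brown": "Sensory Processing Disorder"}
--
--     text = "Mentor Connections:\n"
--     if profile["Condition"].lower() not in [condition.lower() for condition in mentors.values()]:
--         text += f"- Robert Clark (Condition: {profile['Condition']})\n"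
--         text += f"  Contact: robert.clark@neurodivergentsupport.org\n"
--     else:
--         for mentor, condition in mentors.items():
--             if condition.lower() == profile["Condition"].lower():
--                 email = mentor.lower().replace(" ", ".") + "@neurodivergentsupport.org"
--                 text += f"- {mentor} (Condition: {condition})\n"
--                 text += f"  Contact: {email}\n"
--
--     return text
-- ===== SOURCE B (Python) =====
-- _RESPONSES = {
--     "autism": "Mentor Connections:\n- John Doe (Condition: Autism)\n"
--               "  Contact: john.doe@neurodivergentsupport.org\n",
--     "adhd": "Mentor Connections:\n- Jane Smith (Condition: ADHD)\n"
--             "  Contact: jane.smith@neurodivergentsupport.org\n",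
--     "dyslexia": "Mentor Connections:\n- Alex Johnson (Condition: Dyslexia)\n"
--                 "  Contact: alex.johnson@neurodivergentsupport.org\n",
--     "dyspraxia": "Mentor Connections:\n- Emily Davis (Condition: Dyspraxia)\n"
--                  "  Contact: emily.davis@neurodivergentsupport.org\n",
--     "sensory processing disorder":
--         "Mentor Connections:\n- Michael Brown (Condition: Sensory Processing Disorder)\n"
--         "  Contact: michael.brown@neurodivergentsupport.org\n",
-- }
--
-- def connect_with_mentor(profile):
--     """Provides a mentor based on the user's neurodivergent condition"""
--     cond = profile["Condition"]
--     hit = _RESPONSES.get(cond.lower())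
--     if hit is not None:
--         return hit
--     return ("Mentor Connections:\n- Robert Clark (Condition: " + cond
--             + ")\n  Contact: robert.clark@neurodivergentsupport.org\n")
-- ===== Notes on version B (the rewrite author's own statement) =====
-- stated objective: simpler
-- what changed: Replaces A's runtime scan over the mentors dict and per-hit string formatting (email derived via lower+replace) with a precomputed table mapping each lowered condition directly to the complete finished output string, leaving only a single .get and a literal fallback.
import Mathlib
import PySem

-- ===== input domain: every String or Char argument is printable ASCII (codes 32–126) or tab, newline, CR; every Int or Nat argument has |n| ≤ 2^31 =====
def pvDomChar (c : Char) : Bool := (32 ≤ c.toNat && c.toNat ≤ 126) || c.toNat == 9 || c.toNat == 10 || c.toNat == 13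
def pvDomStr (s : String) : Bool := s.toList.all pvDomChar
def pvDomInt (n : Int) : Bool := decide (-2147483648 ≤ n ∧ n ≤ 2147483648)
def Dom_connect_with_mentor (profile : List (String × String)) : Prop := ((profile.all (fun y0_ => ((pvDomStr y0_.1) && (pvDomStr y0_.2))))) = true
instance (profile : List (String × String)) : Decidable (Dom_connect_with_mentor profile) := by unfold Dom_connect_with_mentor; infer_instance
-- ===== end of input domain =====

set_option maxRecDepth 4000


-- B replaces A's runtime scan over the mentors dict and per-hit string formatting with a
-- precomputed table from lowered condition to the complete finished output string; objective: simpler.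

-- ===== PORT A =====
-- the hardcoded mentors dict of A, (mentor, condition) in insertion order
def pvMentors : List (String × String) :=
  [("John Doe", "Autism"), ("Jane Smith", "ADHD"), ("Alex Johnson", "Dyslexia"),
   ("Emily Davis", "Dyspraxia"), ("Michael Brown", "Sensory Processing Disorder")]

def connect_with_mentor (profile : List (String × String)) : String :=
  let mentors := pvMentors
  -- profile["Condition"]: first-match lookup; Pre_ excludes the KeyError case (then getD "" is unreached)
  let cond := ((PySem.Dict.mk profile).get? "Condition").getD ""
  let text := "Mentor Connections:\n"
  if (PySem.Str.lower cond) ∉ mentors.map (fun p => PySem.Str.lower p.2) then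
    text ++ "- Robert Clark (Condition: " ++ cond ++ ")\n"
         ++ "  Contact: robert.clark@neurodivergentsupport.org\n"
  else
    mentors.foldl (fun t p =>
      if PySem.Str.lower p.2 == PySem.Str.lower cond then
        t ++ "- " ++ p.1 ++ " (Condition: " ++ p.2 ++ ")\n"
          ++ "  Contact: " ++ (PySem.Str.replace (PySem.Str.lower p.1) " " "." ++ "@neurodivergentsupport.org") ++ "\n"
      else t) text

-- ===== PORT B =====
-- B's precomputed table: lowered condition -> complete finished response text
def pvResponses : List (String × String) :=
  [("autism", "Mentor Connections:\n- John Doe (Condition: Autism)\n  Contact: john.doe@neurodivergentsupport.org\n"),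
   ("adhd", "Mentor Connections:\n- Jane Smith (Condition: ADHD)\n  Contact: jane.smith@neurodivergentsupport.org\n"),
   ("dyslexia", "Mentor Connections:\n- Alex Johnson (Condition: Dyslexia)\n  Contact: alex.johnson@neurodivergentsupport.org\n"),
   ("dyspraxia", "Mentor Connections:\n- Emily Davis (Condition: Dyspraxia)\n  Contact: emily.davis@neurodivergentsupport.org\n"),
   ("sensory processing disorder", "Mentor Connections:\n- Michael Brown (Condition: Sensory Processing Disorder)\n  Contact: michael.brown@neurodivergentsupport.org\n")]

def connect_with_mentor_alt (profile : List (String × String)) : String :=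
  let cond := ((PySem.Dict.mk profile).get? "Condition").getD ""
  match (PySem.Dict.mk pvResponses).get? (PySem.Str.lower cond) with
  | some t => t
  | none =>
      "Mentor Connections:\n- Robert Clark (Condition: " ++ cond
        ++ ")\n  Contact: robert.clark@neurodivergentsupport.org\n"

-- ===== PRECONDITION & SPEC =====
-- Pre_ excludes exactly the profiles without a "Condition" key, on which Python A raises KeyError.
def Pre_connect_with_mentor (profile : List (String × String)) : Prop :=
  "Condition" ∈ profile.map Prod.fst
instance (profile : List (String × String)) : Decidable (Pre_connect_with_mentor profile) := by unfold Pre_connect_with_mentor; infer_instance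
def pvWitness_connect_with_mentor : (List (String × String)) := [("Condition", "ADHD")]

def Spec_connect_with_mentor (profile : List (String × String)) (out : String) : Prop := out = connect_with_mentor_alt profile
instance (profile : List (String × String)) (out : String) : Decidable (Spec_connect_with_mentor profile out) := by unfold Spec_connect_with_mentor; infer_instance

-- ===== CLAIM =====
def Claim_equal_connect_with_mentor : Prop := ∀ (profile : List (String × String)), Dom_connect_with_mentor profile → Pre_connect_with_mentor profile → Spec_connect_with_mentor profile (connect_with_mentor profile)

-- ===== LEMMAS AND PROOFS =====

-- merge two adjacent string literals under left association
theorem pv_app_app (x a b ab : String) (h : a ++ b = ab) : x ++ a ++ b = x ++ ab := by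
  rw [String.append_assoc, h]

-- the heart of the equivalence: for ANY condition string c, A's scan-and-format body and
-- B's precomputed-table lookup produce the same text
theorem pv_core (c : String) :
    (let mentors := pvMentors
     let text := "Mentor Connections:\n"
     if (PySem.Str.lower c) ∉ mentors.map (fun p => PySem.Str.lower p.2) then
       text ++ "- Robert Clark (Condition: " ++ c ++ ")\n"
            ++ "  Contact: robert.clark@neurodivergentsupport.org\n"
     else
       mentors.foldl (fun t p =>
         if PySem.Str.lower p.2 == PySem.Str.lower c then
           t ++ "- " ++ p.1 ++ " (Condition: " ++ p.2 ++ ")\n"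
             ++ "  Contact: " ++ (PySem.Str.replace (PySem.Str.lower p.1) " " "." ++ "@neurodivergentsupport.org") ++ "\n"
         else t) text)
    =
    (match (PySem.Dict.mk pvResponses).get? (PySem.Str.lower c) with
     | some t => t
     | none =>
         "Mentor Connections:\n- Robert Clark (Condition: " ++ c
           ++ ")\n  Contact: robert.clark@neurodivergentsupport.org\n") := by
  by_cases h1 : PySem.Str.lower c = "autism"
  · rw [h1]; rfl
  by_cases h2 : PySem.Str.lower c = "adhd"
  · rw [h2]; rfl
  by_cases h3 : PySem.Str.lower c = "dyslexia"
  · rw [h3]; rfl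
  by_cases h4 : PySem.Str.lower c = "dyspraxia"
  · rw [h4]; rfl
  by_cases h5 : PySem.Str.lower c = "sensory processing disorder"
  · rw [h5]; rfl
  · -- no mentor matches: both take the Robert Clark fallback
    have l1 : PySem.Str.lower "Autism" = "autism" := rfl
    have l2 : PySem.Str.lower "ADHD" = "adhd" := rfl
    have l3 : PySem.Str.lower "Dyslexia" = "dyslexia" := rfl
    have l4 : PySem.Str.lower "Dyspraxia" = "dyspraxia" := rfl
    have l5 : PySem.Str.lower "Sensory Processing Disorder" = "sensory processing disorder" := rfl
    rw [if_pos (by simp [pvMentors, l1, l2, l3, l4, l5, h1, h2, h3, h4, h5])]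
    have hb : (PySem.Dict.mk pvResponses).get? (PySem.Str.lower c) = none := by
      simp [pvResponses, PySem.Dict.get?_mk_cons, Ne.symm h1, Ne.symm h2, Ne.symm h3, Ne.symm h4, Ne.symm h5, PySem.Dict.get?, PySem.Dict.mk]
    rw [hb]
    rw [pv_app_app ("Mentor Connections:\n" ++ "- Robert Clark (Condition: " ++ c)
      ")\n" "  Contact: robert.clark@neurodivergentsupport.org\n"
      ")\n  Contact: robert.clark@neurodivergentsupport.org\n" rfl]
    rfl

-- ===== VERDICT =====
theorem connect_with_mentor_spec : Claim_equal_connect_with_mentor := by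
  intro profile _ _
  unfold Spec_connect_with_mentor connect_with_mentor connect_with_mentor_alt
  exact pv_core (((PySem.Dict.mk profile).get? "Condition").getD "")
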